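-- pv_equiv track=rewrite | github.com/amew0/autoencoders | utils/classes.py | kspo
-- ===== SOURCE A (Python) =====
-- def kspo(input_size, output_size):
--     possible_params = []
--     for k in range(1, output_size//2+1):
--         for s in range(1, output_size//2+1):
--             for p in range(0, output_size//2+1):
--                 for op in range(0, output_size//2+1):
--                     if output_size == (input_size - 1) * s + k - 2*p + op :
--                         possible_params.append((k, s, p, op))
--     return possible_params
-- ===== SOURCE B (Python) =====
-- def _p_interval(input_size, output_size, h, k, s):
--     # valid p: 0 <= p <= h and 0 <= output_size - c0 + 2*p <= h, where c0 = (input_size-1)*s + k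
--     c0 = (input_size - 1) * s + k
--     plo = max(0, (c0 - output_size + 1) // 2)
--     phi = min(h, (c0 - output_size + h) // 2)
--     return plo, phi
--
-- def kspo(input_size, output_size):
--     h = output_size // 2
--     total = 0
--     for k in range(1, h + 1):
--         for s in range(1, h + 1):
--             plo, phi = _p_interval(input_size, output_size, h, k, s)
--             if plo <= phi:
--                 total += phi - plo + 1
--     out = [None] * total
--     i = 0
--     for k in range(1, h + 1):
--         for s in range(1, h + 1):
--             plo, phi = _p_interval(input_size, output_size, h, k, s)
--             c0 = (input_size - 1) * s + k
--             for p in range(plo, phi + 1):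
--                 out[i] = (k, s, p, output_size - c0 + 2 * p)
--                 i += 1
--     return out
-- ===== Notes on version B (the rewrite author's own statement) =====
-- stated objective: faster
-- what changed: B removes the two innermost loops: per (k,s) the valid p values form an interval computed by solving the size equation for op, and B counts these intervals, preallocates the result list, and fills it, instead of A's brute-force quadruple loop.
import Mathlib
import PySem

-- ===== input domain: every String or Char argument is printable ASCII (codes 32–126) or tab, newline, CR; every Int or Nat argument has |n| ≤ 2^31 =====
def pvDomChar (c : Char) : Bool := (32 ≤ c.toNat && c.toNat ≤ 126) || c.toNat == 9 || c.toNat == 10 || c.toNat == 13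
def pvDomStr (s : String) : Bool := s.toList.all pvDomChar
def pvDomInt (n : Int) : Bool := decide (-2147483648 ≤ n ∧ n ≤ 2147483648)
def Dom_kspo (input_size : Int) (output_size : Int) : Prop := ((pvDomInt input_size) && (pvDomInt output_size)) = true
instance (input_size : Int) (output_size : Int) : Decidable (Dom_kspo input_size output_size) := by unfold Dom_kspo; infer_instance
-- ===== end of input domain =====

-- B replaces A's quadruple loop by counting the valid (k,s,p)-interval lengths, preallocating
-- the result, and filling it: per (k,s) the valid p form an interval and op is determined.

-- ===== PORT A =====
def kspo (input_size : Int) (output_size : Int) : List (List Int) :=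
  let h := PySem.Int.floordiv output_size 2
  (PySem.List.pyRange 1 (h + 1) 1).foldl (fun acc k =>
    (PySem.List.pyRange 1 (h + 1) 1).foldl (fun acc s =>
      (PySem.List.pyRange 0 (h + 1) 1).foldl (fun acc p =>
        (PySem.List.pyRange 0 (h + 1) 1).foldl (fun acc op =>
          if output_size = (input_size - 1) * s + k - 2 * p + op then
            acc ++ [[k, s, p, op]]
          else acc) acc) acc) acc) []

-- ===== PORT B =====
-- helper _p_interval of Source B
def kspo_pInterval (input_size : Int) (output_size : Int) (h : Int) (k : Int) (s : Int) : Int × Int :=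
  (max 0 (PySem.Int.floordiv ((input_size - 1) * s + k - output_size + 1) 2),
   min h (PySem.Int.floordiv ((input_size - 1) * s + k - output_size + h) 2))

-- Python's '[None] * total' placeholder is ported as List.replicate with placeholder []
-- (every slot is overwritten by the fill loop; 'out[i] = …' is PySem.List.pySetD).
def kspo_alt (input_size : Int) (output_size : Int) : List (List Int) :=
  let h := PySem.Int.floordiv output_size 2
  let total := (PySem.List.pyRange 1 (h + 1) 1).foldl (fun t k =>
      (PySem.List.pyRange 1 (h + 1) 1).foldl (fun t s =>
        if (kspo_pInterval input_size output_size h k s).1 ≤ (kspo_pInterval input_size output_size h k s).2 then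
          t + ((kspo_pInterval input_size output_size h k s).2 - (kspo_pInterval input_size output_size h k s).1 + 1)
        else t) t) 0
  let out0 : List (List Int) := List.replicate total.toNat []
  let st := (PySem.List.pyRange 1 (h + 1) 1).foldl (fun st k =>
      (PySem.List.pyRange 1 (h + 1) 1).foldl (fun st s =>
        (PySem.List.pyRange (kspo_pInterval input_size output_size h k s).1 ((kspo_pInterval input_size output_size h k s).2 + 1) 1).foldl
          (fun (st : List (List Int) × Int) p =>
            (PySem.List.pySetD st.1 st.2 [k, s, p, output_size - ((input_size - 1) * s + k) + 2 * p], st.2 + 1)) st) st)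
      (out0, (0 : Int))
  st.1

-- ===== PRECONDITION & SPEC =====
def Spec_kspo (input_size : Int) (output_size : Int) (out : List (List Int)) : Prop := out = kspo_alt input_size output_size
instance (input_size : Int) (output_size : Int) (out : List (List Int)) : Decidable (Spec_kspo input_size output_size out) := by unfold Spec_kspo; infer_instance

-- ===== CLAIM (what is proved, stated in full; the proofs are below) =====
def Claim_equal_kspo : Prop := ∀ (input_size : Int) (output_size : Int), Dom_kspo input_size output_size → Spec_kspo input_size output_size (kspo input_size output_size)

-- ===== LEMMAS AND PROOFS =====

-- the (k,s)-chunk both programs produce: valid p form an interval, op is determined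
def kchunk (i o h k s : Int) : List (List Int) :=
  (PySem.List.pyRange (kspo_pInterval i o h k s).1 ((kspo_pInterval i o h k s).2 + 1) 1).map
    (fun p => [k, s, p, o - ((i - 1) * s + k) + 2 * p])

def kflat (i o h : Int) : List (List Int) :=
  (PySem.List.pyRange 1 (h + 1) 1).flatMap (fun k =>
    (PySem.List.pyRange 1 (h + 1) 1).flatMap (fun s => kchunk i o h k s))

-- A's innermost op-loop appends at most one tuple: exactly when the solved-for op is in range
theorem kspo_inner_aux (o C : Int) (v : Int → List Int) (n : Nat) (acc : List (List Int)) :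
    (List.range n).foldl (fun (acc : List (List Int)) (k : Nat) => if o = C + ((0 : Int) + (k : Int)) then acc ++ [v ((0 : Int) + (k : Int))] else acc) acc
      = if 0 ≤ o - C ∧ o - C < (n : Int) then acc ++ [v (o - C)] else acc := by
  induction n generalizing acc with
  | zero =>
    have h0 : ¬ (0 ≤ o - C ∧ o - C < ((0 : Nat) : Int)) := by push_cast; omega
    simp only [List.range_zero, List.foldl_nil, if_neg h0]
  | succ m ih =>
    rw [List.range_succ, List.foldl_append, ih]
    by_cases h : o = C + ((0 : Int) + (m : Int))
    · have h1 : ¬ (0 ≤ o - C ∧ o - C < (m : Int)) := by omega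
      have h2 : 0 ≤ o - C ∧ o - C < ((m + 1 : Nat) : Int) := by push_cast; omega
      have h3 : (0 : Int) + (m : Int) = o - C := by omega
      simp only [if_neg h1, List.foldl_cons, List.foldl_nil, if_pos h2, h3]
      rw [if_pos (by omega)]
    · have h3 : (0 ≤ o - C ∧ o - C < ((m + 1 : Nat) : Int)) ↔ (0 ≤ o - C ∧ o - C < (m : Int)) := by
        push_cast; omega
      simp only [List.foldl_cons, List.foldl_nil, if_neg h]
      rw [if_congr h3 rfl rfl]

theorem kspo_inner (o C h : Int) (v : Int → List Int) (acc : List (List Int)) :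
    (PySem.List.pyRange 0 (h + 1) 1).foldl (fun acc op => if o = C + op then acc ++ [v op] else acc) acc
      = if 0 ≤ o - C ∧ o - C ≤ h then acc ++ [v (o - C)] else acc := by
  rw [PySem.List.pyRange_one, List.foldl_map]
  rw [kspo_inner_aux o C v (h + 1 - 0).toNat acc]
  by_cases hb : 0 ≤ h + 1
  · have hc : ((h + 1 - 0).toNat : Int) = h + 1 := by omega
    rw [hc]
    split_ifs with p1 p2 p2 <;> first | rfl | omega
  · have hc : ((h + 1 - 0).toNat : Int) = 0 := by omega
    rw [hc]
    split_ifs with p1 p2 p2 <;> first | rfl | omega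

-- a 0-based range filtered by an interval condition is the subrange
theorem filter_pyRange_interval (n l r : Int) (q : Int → Prop) [DecidablePred q]
    (hl : 0 ≤ l) (hr : r ≤ n)
    (hq : ∀ p : Int, 0 ≤ p → p < n → (q p ↔ (l ≤ p ∧ p < r))) :
    (PySem.List.pyRange 0 n 1).filter (fun p => decide (q p)) = PySem.List.pyRange l r 1 := by
  by_cases hlr : l < r
  · rw [PySem.List.pyRange_one_append 0 l n hl (by omega),
        PySem.List.pyRange_one_append l r n (by omega) hr,
        List.filter_append, List.filter_append]
    have e1 : (PySem.List.pyRange 0 l 1).filter (fun p => decide (q p)) = [] := by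
      rw [List.filter_eq_nil_iff]
      intro p hp
      rw [PySem.List.mem_pyRange_one] at hp
      simp only [decide_eq_true_eq]
      rw [hq p hp.1 (by omega)]
      omega
    have e2 : (PySem.List.pyRange l r 1).filter (fun p => decide (q p)) = PySem.List.pyRange l r 1 := by
      rw [List.filter_eq_self]
      intro p hp
      rw [PySem.List.mem_pyRange_one] at hp
      simp only [decide_eq_true_eq]
      rw [hq p (by omega) (by omega)]
      omega
    have e3 : (PySem.List.pyRange r n 1).filter (fun p => decide (q p)) = [] := by
      rw [List.filter_eq_nil_iff]
      intro p hp
      rw [PySem.List.mem_pyRange_one] at hp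
      simp only [decide_eq_true_eq]
      rw [hq p (by omega) hp.2]
      omega
    rw [e1, e2, e3, List.nil_append, List.append_nil]
  · rw [PySem.List.pyRange_one_eq_nil (by omega : r ≤ l)]
    rw [List.filter_eq_nil_iff]
    intro p hp
    rw [PySem.List.mem_pyRange_one] at hp
    simp only [decide_eq_true_eq]
    rw [hq p hp.1 hp.2]
    omega

-- A's p-loop (with the op-loop already collapsed) produces exactly the (k,s)-chunk
theorem kspo_ploop (i o h k s : Int) (acc : List (List Int)) :
    (PySem.List.pyRange 0 (h + 1) 1).foldl (fun acc p =>
        if 0 ≤ o - ((i - 1) * s + k - 2 * p) ∧ o - ((i - 1) * s + k - 2 * p) ≤ h then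
          acc ++ [[k, s, p, o - ((i - 1) * s + k - 2 * p)]]
        else acc) acc
      = acc ++ kchunk i o h k s := by
  rw [PySem.List.foldl_append_ite
        (fun p => 0 ≤ o - ((i - 1) * s + k - 2 * p) ∧ o - ((i - 1) * s + k - 2 * p) ≤ h)
        (fun p => [k, s, p, o - ((i - 1) * s + k - 2 * p)])]
  unfold kchunk kspo_pInterval
  rw [PySem.Int.floordiv_eq_ediv_of_pos (by omega), PySem.Int.floordiv_eq_ediv_of_pos (by omega)]
  rw [filter_pyRange_interval (h + 1)
        (max 0 (((i - 1) * s + k - o + 1) / 2))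
        ((min h (((i - 1) * s + k - o + h) / 2)) + 1)
        _ (by omega) (by omega) (fun p _ _ => by omega)]
  congr 1
  apply List.map_congr_left
  intro p _
  have : o - ((i - 1) * s + k - 2 * p) = o - ((i - 1) * s + k) + 2 * p := by ring
  rw [this]

-- counting: a fold adding per-element lengths is the length of the flatMap
theorem count_flatMap {α β : Type} (L : List α) (f : α → Int) (g : α → List β)
    (hfg : ∀ x ∈ L, f x = ((g x).length : Int)) :
    ∀ t0 : Int, L.foldl (fun t x => t + f x) t0 = t0 + ((L.flatMap g).length : Int) := by
  induction L with
  | nil => intro t0; simp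
  | cons x xs ih =>
    intro t0
    rw [List.foldl_cons, ih (fun y hy => hfg y (List.mem_cons_of_mem x hy))]
    simp only [List.flatMap_cons, List.length_append]
    rw [hfg x List.mem_cons_self]
    push_cast
    ring

-- sequential filling of a preallocated list writes the elements in order
theorem seqFill {α : Type} (xs : List α) :
    ∀ (ys : List α) (m : Nat) (d : α),
      xs.foldl (fun (st : List α × Int) v => (PySem.List.pySetD st.1 st.2 v, st.2 + 1))
        (ys ++ List.replicate (xs.length + m) d, (ys.length : Int))
        = (ys ++ xs ++ List.replicate m d, (ys.length : Int) + xs.length) := by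
  induction xs with
  | nil => intro ys m d; simp
  | cons x xs ih =>
    intro ys m d
    rw [List.foldl_cons]
    have hrep : List.replicate ((x :: xs).length + m) d = d :: List.replicate (xs.length + m) d := by
      rw [List.length_cons, show xs.length + 1 + m = (xs.length + m) + 1 by omega, List.replicate_succ]
    rw [hrep]
    have hset : PySem.List.pySetD (ys ++ d :: List.replicate (xs.length + m) d) (ys.length : Int) x
        = ys ++ x :: List.replicate (xs.length + m) d := by
      rw [PySem.List.pySetD_of_nonneg _ _ (by positivity), Int.toNat_natCast]
      rw [List.set_append_right _ _ (Nat.le_refl _)]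
      simp
    simp only [hset]
    have harr : ys ++ x :: List.replicate (xs.length + m) d
        = (ys ++ [x]) ++ List.replicate (xs.length + m) d := by simp
    have hidx : (ys.length : Int) + 1 = (((ys ++ [x]).length : Nat) : Int) := by
      simp
    rw [harr, hidx, ih (ys ++ [x]) m d]
    rw [Prod.mk.injEq]
    constructor
    · simp
    · simp only [List.length_append, List.length_cons, List.length_nil]
      push_cast
      ring

-- folding over a flatMap is the nested fold
theorem foldl_flatMap_nested {α β γ : Type} (L : List α) (g : α → List β) (f : γ → β → γ) :
    ∀ init : γ, (L.flatMap g).foldl f init = L.foldl (fun acc x => (g x).foldl f acc) init := by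
  induction L with
  | nil => intro init; simp
  | cons x xs ih => intro init; simp [List.flatMap_cons, List.foldl_append, ih]

-- A equals the flattened chunk list
theorem kspo_eq_flat (i o : Int) : kspo i o = kflat i o (PySem.Int.floordiv o 2) := by
  unfold kspo
  simp only [kspo_inner, kspo_ploop, PySem.List.foldl_append_eq_flatMap]
  unfold kflat
  simp

-- the chunk-length cast needed by the counting fold
theorem kchunk_len (i o h k s t : Int) :
    (if (kspo_pInterval i o h k s).1 ≤ (kspo_pInterval i o h k s).2 then
        t + ((kspo_pInterval i o h k s).2 - (kspo_pInterval i o h k s).1 + 1)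
      else t) = t + ((kchunk i o h k s).length : Int) := by
  unfold kchunk
  rw [List.length_map, PySem.List.length_pyRange_one]
  split_ifs with hc <;> omega

-- B equals the flattened chunk list
theorem kspo_alt_eq_flat (i o : Int) : kspo_alt i o = kflat i o (PySem.Int.floordiv o 2) := by
  unfold kspo_alt
  simp only [kchunk_len]
  have h1 : ∀ (t : Int) (k : Int),
      (PySem.List.pyRange 1 (PySem.Int.floordiv o 2 + 1) 1).foldl
        (fun t s => t + ((kchunk i o (PySem.Int.floordiv o 2) k s).length : Int)) t
      = t + (((PySem.List.pyRange 1 (PySem.Int.floordiv o 2 + 1) 1).flatMap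
              (fun s => kchunk i o (PySem.Int.floordiv o 2) k s)).length : Int) := by
    intro t k
    exact count_flatMap _ _ _ (fun s _ => rfl) t
  simp only [h1]
  have h2 : (PySem.List.pyRange 1 (PySem.Int.floordiv o 2 + 1) 1).foldl
        (fun t k => t + (((PySem.List.pyRange 1 (PySem.Int.floordiv o 2 + 1) 1).flatMap
              (fun s => kchunk i o (PySem.Int.floordiv o 2) k s)).length : Int)) 0
      = 0 + ((kflat i o (PySem.Int.floordiv o 2)).length : Int) :=
    count_flatMap _ _ _ (fun k _ => rfl) 0
  rw [h2]
  -- fill loop: rewrite each p-loop as a fold over the chunk, collapse to a fold over kflat, run seqFill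
  have h3 : ∀ (st : List (List Int) × Int) (k s : Int),
      (PySem.List.pyRange (kspo_pInterval i o (PySem.Int.floordiv o 2) k s).1
          ((kspo_pInterval i o (PySem.Int.floordiv o 2) k s).2 + 1) 1).foldl
        (fun (st : List (List Int) × Int) p =>
          (PySem.List.pySetD st.1 st.2 [k, s, p, o - ((i - 1) * s + k) + 2 * p], st.2 + 1)) st
      = (kchunk i o (PySem.Int.floordiv o 2) k s).foldl
          (fun (st : List (List Int) × Int) v => (PySem.List.pySetD st.1 st.2 v, st.2 + 1)) st := by
    intro st k s
    unfold kchunk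
    rw [List.foldl_map]
  simp only [h3]
  have h4 : ∀ (st : List (List Int) × Int) (k : Int),
      (PySem.List.pyRange 1 (PySem.Int.floordiv o 2 + 1) 1).foldl
        (fun st s => (kchunk i o (PySem.Int.floordiv o 2) k s).foldl
          (fun (st : List (List Int) × Int) v => (PySem.List.pySetD st.1 st.2 v, st.2 + 1)) st) st
      = ((PySem.List.pyRange 1 (PySem.Int.floordiv o 2 + 1) 1).flatMap
          (fun s => kchunk i o (PySem.Int.floordiv o 2) k s)).foldl
          (fun (st : List (List Int) × Int) v => (PySem.List.pySetD st.1 st.2 v, st.2 + 1)) st := by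
    intro st k
    rw [foldl_flatMap_nested]
  simp only [h4]
  rw [← foldl_flatMap_nested (PySem.List.pyRange 1 (PySem.Int.floordiv o 2 + 1) 1)
        (fun k => (PySem.List.pyRange 1 (PySem.Int.floordiv o 2 + 1) 1).flatMap
          (fun s => kchunk i o (PySem.Int.floordiv o 2) k s))
        (fun (st : List (List Int) × Int) v => (PySem.List.pySetD st.1 st.2 v, st.2 + 1))]
  have hflat : ((PySem.List.pyRange 1 (PySem.Int.floordiv o 2 + 1) 1).flatMap
      (fun k => (PySem.List.pyRange 1 (PySem.Int.floordiv o 2 + 1) 1).flatMap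
        (fun s => kchunk i o (PySem.Int.floordiv o 2) k s)))
      = kflat i o (PySem.Int.floordiv o 2) := rfl
  rw [hflat]
  have htotnat : (0 + ((kflat i o (PySem.Int.floordiv o 2)).length : Int)).toNat
      = (kflat i o (PySem.Int.floordiv o 2)).length + 0 := by omega
  rw [htotnat]
  have := seqFill (kflat i o (PySem.Int.floordiv o 2)) [] 0 ([] : List Int)
  simp only [List.nil_append, List.length_nil, Nat.cast_zero] at this
  rw [this]
  simp

-- ===== VERDICT (by name: the statement is the Claim_ definition above) =====
theorem kspo_spec : Claim_equal_kspo := by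
  intro i o _
  unfold Spec_kspo
  rw [kspo_eq_flat, kspo_alt_eq_flat]
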